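-- pv_equiv track=rewrite | github.com/arriberelab/arriberelab | 250811_WohlenbergCatp6Paper/polyAAPauseScore.py | getMetaDataPrepared
-- ===== SOURCE A (Python) =====
-- def getMetaDataPrepared(metaData,X,N):
--     aa=[]
--     counter=0
--     for name,metaDict in metaData:
--         temp=[]
--         for ii in range(-X,X+N):
--             if ii in metaDict:
--                 temp.append((ii,metaDict[ii]))
--                 counter+=1
--             else:
--                 temp.append((ii,0))
--         aa.append((name,temp))
--     return aa, counter
-- ===== SOURCE B (Python) =====
-- def getMetaDataPrepared(metaData, X, N):
--     positions = range(-X, X + N)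
--     aa = [(name, [(ii, metaDict.get(ii, 0)) for ii in positions])
--           for name, metaDict in metaData]
--     counter = 0
--     for _name, metaDict in metaData:
--         counter += len(metaDict.keys() & set(positions))
--     return aa, counter
-- ===== Notes on version B (the rewrite author's own statement) =====
-- stated objective: alternative
-- what changed: Splits A's single fused membership-test-and-count loop into two independent passes: the positions table is materialized with dict.get(ii, 0) (no membership branch), and the hit count is computed per entry as the size of the set intersection of the dict's keys with the position range.
import Mathlib
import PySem

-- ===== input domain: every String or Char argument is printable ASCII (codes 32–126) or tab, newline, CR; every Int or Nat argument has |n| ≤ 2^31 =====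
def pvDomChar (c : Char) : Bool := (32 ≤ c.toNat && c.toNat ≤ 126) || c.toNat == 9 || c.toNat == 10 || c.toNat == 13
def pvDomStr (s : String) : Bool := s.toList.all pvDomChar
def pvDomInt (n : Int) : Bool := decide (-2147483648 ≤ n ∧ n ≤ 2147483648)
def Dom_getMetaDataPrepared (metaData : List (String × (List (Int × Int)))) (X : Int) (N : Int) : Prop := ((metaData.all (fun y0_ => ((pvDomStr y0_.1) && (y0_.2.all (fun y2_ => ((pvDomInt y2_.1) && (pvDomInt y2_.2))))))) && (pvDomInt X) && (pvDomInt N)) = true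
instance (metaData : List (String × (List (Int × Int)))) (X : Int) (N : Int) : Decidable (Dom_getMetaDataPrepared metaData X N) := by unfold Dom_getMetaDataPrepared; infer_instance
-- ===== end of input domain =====

-- B replaces A's fused membership-test-and-count loop by two independent passes
-- (a get(ii,0) table build and a keys∩range set count); alternative decomposition, same cost.

-- ===== PORT A =====
-- one step of A's inner 'for ii in range(-X, X+N)' loop: state = (temp, counter)
def pvAStep (d : PySem.Dict Int Int) (st : (List (Int × Int)) × Int) (ii : Int) : (List (Int × Int)) × Int :=
  match d.get? ii with
  | some v => (st.1 ++ [(ii, v)], st.2 + 1)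
  | none   => (st.1 ++ [(ii, 0)], st.2)

def getMetaDataPrepared (metaData : List (String × (List (Int × Int)))) (X : Int) (N : Int) : (List (String × (List (Int × Int)))) × Int :=
  metaData.foldl (fun acc nm =>
    let temp := (PySem.List.pyRange (-X) (X + N) 1).foldl (pvAStep (PySem.Dict.mk nm.2)) ([], acc.2)
    (acc.1 ++ [(nm.1, temp.1)], temp.2)) ([], 0)

-- ===== PORT B =====
-- hits of one entry: |metaDict.keys() & set(range(-X, X+N))| (keys as a set, filtered by range membership)
def pvBHits (d : List (Int × Int)) (X : Int) (N : Int) : Int :=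
  ((PySem.Set.ofList (PySem.Dict.mk d).keys).filter (fun k => decide (-X ≤ k ∧ k < X + N))).length

def getMetaDataPrepared_alt (metaData : List (String × (List (Int × Int)))) (X : Int) (N : Int) : (List (String × (List (Int × Int)))) × Int :=
  let aa := metaData.map (fun nm =>
    (nm.1, (PySem.List.pyRange (-X) (X + N) 1).map (fun ii => (ii, (PySem.Dict.mk nm.2).getD ii 0))))
  let counter := metaData.foldl (fun c nm => c + pvBHits nm.2 X N) 0
  (aa, counter)

-- ===== PRECONDITION & SPEC =====
def Spec_getMetaDataPrepared (metaData : List (String × (List (Int × Int)))) (X : Int) (N : Int) (out : (List (String × (List (Int × Int)))) × Int) : Prop := out = getMetaDataPrepared_alt metaData X N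
instance (metaData : List (String × (List (Int × Int)))) (X : Int) (N : Int) (out : (List (String × (List (Int × Int)))) × Int) : Decidable (Spec_getMetaDataPrepared metaData X N out) := by unfold Spec_getMetaDataPrepared; infer_instance

-- ===== CLAIM (what is proved, stated in full; the proofs are below) =====
def Claim_equal_getMetaDataPrepared : Prop := ∀ (metaData : List (String × (List (Int × Int)))) (X : Int) (N : Int), Dom_getMetaDataPrepared metaData X N → Spec_getMetaDataPrepared metaData X N (getMetaDataPrepared metaData X N)

-- ===== LEMMAS AND PROOFS =====

-- A's inner loop builds the getD-table and adds the number of range points that are keys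
theorem pvAStep_foldl (d : PySem.Dict Int Int) (r : List Int) (l : List (Int × Int)) (c : Int) :
    r.foldl (pvAStep d) (l, c) =
      (l ++ r.map (fun ii => (ii, d.getD ii 0)),
       c + (r.countP (fun ii => (d.get? ii).isSome) : Int)) := by
  induction r generalizing l c with
  | nil => simp
  | cons ii r ih =>
    simp only [List.foldl_cons, List.map_cons, List.countP_cons]
    cases h : d.get? ii with
    | some v =>
      simp only [pvAStep, h, ih, PySem.Dict.getD_eq_get?_getD]
      simp
      ring
    | none =>
      simp only [pvAStep, h, ih, PySem.Dict.getD_eq_get?_getD]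
      simp

-- for duplicate-free lists, |u ∩ v| counted over u = |v ∩ u| counted over v
theorem count_swap (u v : List Int) (hu : u.Nodup) (hv : v.Nodup) :
    u.countP (fun x => decide (x ∈ v)) = (v.filter (fun x => decide (x ∈ u))).length := by
  rw [List.countP_eq_length_filter]
  rw [← List.toFinset_card_of_nodup (List.Nodup.filter _ hu),
      ← List.toFinset_card_of_nodup (List.Nodup.filter _ hv)]
  congr 1
  rw [List.toFinset_filter, List.toFinset_filter]
  ext x
  simp
  tauto

-- counting range points that are keys = counting distinct keys that lie in the range
theorem hits_eq (d : List (Int × Int)) (X N : Int) :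
    ((PySem.List.pyRange (-X) (X + N) 1).countP (fun ii => ((PySem.Dict.mk d).get? ii).isSome) : Int)
      = pvBHits d X N := by
  unfold pvBHits
  norm_cast
  have h1 : (fun ii => ((PySem.Dict.mk d).get? ii).isSome)
      = (fun ii => decide (ii ∈ PySem.Set.ofList (PySem.Dict.mk d).keys)) := by
    funext ii
    rw [← PySem.Dict.contains_eq_isSome_get?, PySem.Dict.contains_eq_decide_mem_keys]
    simp [PySem.Set.mem_ofList]
  rw [h1, count_swap _ _ (PySem.List.nodup_pyRange_one _ _) (PySem.Set.nodup_ofList _)]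
  congr 1
  apply List.filter_congr
  intro k _
  simp [PySem.List.mem_pyRange_one]

-- the outer loop, generalized over the running accumulator
theorem outer_foldl (metaData : List (String × (List (Int × Int)))) (X N : Int)
    (l : List (String × (List (Int × Int)))) (c : Int) :
    metaData.foldl (fun acc nm =>
      let temp := (PySem.List.pyRange (-X) (X + N) 1).foldl (pvAStep (PySem.Dict.mk nm.2)) ([], acc.2)
      (acc.1 ++ [(nm.1, temp.1)], temp.2)) (l, c) =
    (l ++ metaData.map (fun nm =>
        (nm.1, (PySem.List.pyRange (-X) (X + N) 1).map (fun ii => (ii, (PySem.Dict.mk nm.2).getD ii 0)))),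
     metaData.foldl (fun c nm => c + pvBHits nm.2 X N) c) := by
  induction metaData generalizing l c with
  | nil => simp
  | cons nm md ih =>
    simp only [List.foldl_cons, List.map_cons]
    rw [pvAStep_foldl, ih]
    simp [hits_eq]

-- ===== VERDICT (by name: the statement is the Claim_ definition above) =====
theorem getMetaDataPrepared_spec : Claim_equal_getMetaDataPrepared := by
  intro metaData X N _
  show _ = _
  unfold getMetaDataPrepared getMetaDataPrepared_alt
  rw [outer_foldl]
  simp
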